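-- pv_equiv track=rewrite | github.com/AnnaNakhmurina/cities_adaptation | 0.process and clean the textual data/1.keywords_extractor_codes.py | keywords_indices
-- ===== SOURCE A (Python) =====
-- def keywords_indices(stemmed_keyword, exclude_before, exclude_after, token_stem_text):
--
--     key = stemmed_keyword.split()
--
--     if len(key) == 1:
--
--         indices = [[i for i, x in enumerate(t) if x == key[0]] for t in token_stem_text]
--         before = exclude_before.split(", ")
--         after = exclude_after.split(", ")
--         ind = []
--
--         for i in range(len(indices)):
--             inde = []
--             if indices[i] != []:
--                 for j in indices[i]:
--
--                     if j == 0 and (j + 1) < len(token_stem_text[i]):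
--                         if token_stem_text[i][j + 1] not in before:
--                             inde.append(j)
--
--                     elif j >= 1 and (j + 1) == len(token_stem_text[i]):
--                         if token_stem_text[i][j - 1] not in after:
--                             inde.append(j)
--
--                     elif len(token_stem_text[i]) == 1:
--                         inde.append(j)
--
--                     elif j >= 1 and (j + 1) < len(token_stem_text[i]):
--                         if token_stem_text[i][j + 1] not in before and token_stem_text[i][j - 1] not in after:
--                             inde.append(j)
--
--             ind.append(inde)
--
--
--     elif len(key) == 2:
--         ind = []
--         indices = [[i for i, x in enumerate(t) if x == key[0]] for t in token_stem_text]
--         for i in range(len(indices)):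
--             inde = []
--             if indices[i] != []:
--                 for j in indices[i]:
--                     if (j + 1) < len(token_stem_text[i]):
--                         if token_stem_text[i][j + 1] == key[1]:
--                             inde.append(j)
--
--             ind.append(inde)
--
--     elif len(key) == 3:
--         ind = []
--         indices = [[i for i, x in enumerate(t) if x == key[0]] for t in token_stem_text]
--         for i in range(len(indices)):
--             inde = []
--             if indices[i] != []:
--                 for j in indices[i]:
--                     if (j + 2) < len(token_stem_text[i]):
--                         if token_stem_text[i][j + 1] == key[1]:
--                             if token_stem_text[i][j + 2] == key[2]:
--                                 inde.append(j)
--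
--             ind.append(inde)
--
--
--     elif len(key) == 4:
--         ind = []
--         indices = [[i for i, x in enumerate(t) if x == key[0]] for t in token_stem_text]
--         for i in range(len(indices)):
--             inde = []
--             if indices[i] != []:
--                 for j in indices[i]:
--                     if (j + 3) < len(token_stem_text[i]):
--                         if token_stem_text[i][j + 1] == key[1]:
--                             if token_stem_text[i][j + 2] == key[2]:
--                                 if token_stem_text[i][j + 3] == key[3]:
--                                     inde.append(j)
--
--             ind.append(inde)
--
--     res = dict()
--
--     for i in range(len(ind)):
--         if ind[i] != []:
--             res[i] = ind[i]
--
--     return res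
-- ===== SOURCE B (Python) =====
-- def _match_one(key0, before, after, t):
--     return [j for j, x in enumerate(t)
--             if x == key0
--             and (j + 1 == len(t) or t[j + 1] not in before)
--             and (j == 0 or t[j - 1] not in after)]
--
--
-- def _match_many(key, t):
--     return [j for j, x in enumerate(t) if x == key[0] and t[j:j + len(key)] == key]
--
--
-- def keywords_indices(stemmed_keyword, exclude_before, exclude_after, token_stem_text):
--     key = stemmed_keyword.split()
--     if not key:
--         return {}
--     before = exclude_before.split(", ")
--     after = exclude_after.split(", ")
--     res = {}
--     for i, t in enumerate(token_stem_text):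
--         inde = _match_one(key[0], before, after, t) if len(key) == 1 else _match_many(key, t)
--         if inde:
--             res[i] = inde
--     return res
-- ===== Notes on version B (the rewrite author's own statement) =====
-- stated objective: simpler
-- what changed: A's four near-duplicate whole-corpus branches (one per keyword length, each building an indices table, a range(len) loop with a 4-way neighbour case split, and a final dict-building loop) are replaced by a single enumerate pass that builds the dict inline, with the neighbour case split collapsed into one boolean guard and the 2/3/4-word branches unified into a slice comparison t[j:j+len(key)] == key that works for any multi-word keyword.
import Mathlib
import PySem

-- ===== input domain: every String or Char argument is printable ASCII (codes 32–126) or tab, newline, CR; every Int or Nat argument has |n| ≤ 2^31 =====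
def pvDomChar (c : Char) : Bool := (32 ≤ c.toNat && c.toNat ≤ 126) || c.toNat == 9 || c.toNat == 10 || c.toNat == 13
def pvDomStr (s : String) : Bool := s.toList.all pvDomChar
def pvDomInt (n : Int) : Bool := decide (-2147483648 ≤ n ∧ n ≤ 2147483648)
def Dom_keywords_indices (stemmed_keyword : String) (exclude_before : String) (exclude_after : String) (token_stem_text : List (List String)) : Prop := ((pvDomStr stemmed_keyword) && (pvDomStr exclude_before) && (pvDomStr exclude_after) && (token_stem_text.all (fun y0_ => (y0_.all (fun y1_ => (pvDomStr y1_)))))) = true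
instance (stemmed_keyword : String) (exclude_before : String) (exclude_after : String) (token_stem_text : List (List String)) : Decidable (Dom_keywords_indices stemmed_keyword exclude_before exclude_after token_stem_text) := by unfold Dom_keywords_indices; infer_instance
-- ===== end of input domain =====

-- B replaces A's four per-keyword-length whole-corpus branches by one enumerate pass with the
-- neighbour tests collapsed into a single guard and the multi-word branches unified into a slice
-- comparison (objective: simpler). On 0- or 5+-word keywords A raises NameError (excluded by
-- Pre_); B returns the natural value there.

-- ===== PORT A =====
def keywords_indices (stemmed_keyword : String) (exclude_before : String) (exclude_after : String) (token_stem_text : List (List String)) : List (Int × List Int) :=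
  let key := PySem.Str.split₀ stemmed_keyword
  let ind : List (List Int) :=
    if key.length = 1 then
      let indices := token_stem_text.map (fun t =>
        (PySem.List.enumerate t).filterMap (fun p => if p.2 == key.getD 0 "" then some p.1 else none))
      -- ", " is a nonempty separator, so split? is `some` and `.getD []` is exact
      let before := (PySem.Str.split? exclude_before ", ").getD []
      let after := (PySem.Str.split? exclude_after ", ").getD []
      (PySem.List.pyRange 0 (PySem.List.len indices)).foldl (fun ind i =>
        let t := PySem.List.pyGetD token_stem_text i []
        let inde : List Int :=
          if PySem.List.pyGetD indices i [] ≠ [] then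
            (PySem.List.pyGetD indices i []).foldl (fun inde j =>
              if j = 0 ∧ j + 1 < PySem.List.len t then
                (if PySem.List.pyGetD t (j + 1) "" ∉ before then inde ++ [j] else inde)
              else if 1 ≤ j ∧ j + 1 = PySem.List.len t then
                (if PySem.List.pyGetD t (j - 1) "" ∉ after then inde ++ [j] else inde)
              else if PySem.List.len t = 1 then inde ++ [j]
              else if 1 ≤ j ∧ j + 1 < PySem.List.len t then
                (if PySem.List.pyGetD t (j + 1) "" ∉ before ∧ PySem.List.pyGetD t (j - 1) "" ∉ after
                 then inde ++ [j] else inde)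
              else inde) []
          else []
        ind ++ [inde]) []
    else if key.length = 2 then
      let indices := token_stem_text.map (fun t =>
        (PySem.List.enumerate t).filterMap (fun p => if p.2 == key.getD 0 "" then some p.1 else none))
      (PySem.List.pyRange 0 (PySem.List.len indices)).foldl (fun ind i =>
        let t := PySem.List.pyGetD token_stem_text i []
        let inde : List Int :=
          if PySem.List.pyGetD indices i [] ≠ [] then
            (PySem.List.pyGetD indices i []).foldl (fun inde j =>
              if j + 1 < PySem.List.len t then
                (if PySem.List.pyGetD t (j + 1) "" == key.getD 1 "" then inde ++ [j] else inde)
              else inde) []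
          else []
        ind ++ [inde]) []
    else if key.length = 3 then
      let indices := token_stem_text.map (fun t =>
        (PySem.List.enumerate t).filterMap (fun p => if p.2 == key.getD 0 "" then some p.1 else none))
      (PySem.List.pyRange 0 (PySem.List.len indices)).foldl (fun ind i =>
        let t := PySem.List.pyGetD token_stem_text i []
        let inde : List Int :=
          if PySem.List.pyGetD indices i [] ≠ [] then
            (PySem.List.pyGetD indices i []).foldl (fun inde j =>
              if j + 2 < PySem.List.len t then
                (if PySem.List.pyGetD t (j + 1) "" == key.getD 1 "" then
                  (if PySem.List.pyGetD t (j + 2) "" == key.getD 2 "" then inde ++ [j] else inde)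
                 else inde)
              else inde) []
          else []
        ind ++ [inde]) []
    else if key.length = 4 then
      let indices := token_stem_text.map (fun t =>
        (PySem.List.enumerate t).filterMap (fun p => if p.2 == key.getD 0 "" then some p.1 else none))
      (PySem.List.pyRange 0 (PySem.List.len indices)).foldl (fun ind i =>
        let t := PySem.List.pyGetD token_stem_text i []
        let inde : List Int :=
          if PySem.List.pyGetD indices i [] ≠ [] then
            (PySem.List.pyGetD indices i []).foldl (fun inde j =>
              if j + 3 < PySem.List.len t then
                (if PySem.List.pyGetD t (j + 1) "" == key.getD 1 "" then
                  (if PySem.List.pyGetD t (j + 2) "" == key.getD 2 "" then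
                    (if PySem.List.pyGetD t (j + 3) "" == key.getD 3 "" then inde ++ [j] else inde)
                   else inde)
                 else inde)
              else inde) []
          else []
        ind ++ [inde]) []
    else []  -- Python: `ind` was never assigned → NameError; excluded by Pre_
  ((PySem.List.pyRange 0 (PySem.List.len ind)).foldl (fun res i =>
      if PySem.List.pyGetD ind i [] ≠ [] then res.insert i (PySem.List.pyGetD ind i []) else res)
    PySem.Dict.empty).items

-- ===== PORT B =====
-- B-side helpers (Source B's _match1 / _matchk)
def pvMatchOne (key0 : String) (before after : List String) (t : List String) : List Int :=
  (PySem.List.enumerate t).filterMap (fun q =>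
    if (q.2 == key0) = true ∧
        ((q.1 + 1 = PySem.List.len t ∨ PySem.List.pyGetD t (q.1 + 1) "" ∉ before) ∧
         (q.1 = 0 ∨ PySem.List.pyGetD t (q.1 - 1) "" ∉ after))
    then some q.1 else none)

def pvMatchMany (key : List String) (t : List String) : List Int :=
  (PySem.List.enumerate t).filterMap (fun q =>
    if (q.2 == key.getD 0 "") = true ∧
        PySem.List.slice t (some q.1) (some (q.1 + PySem.List.len key)) = key
    then some q.1 else none)

def keywords_indices_alt (stemmed_keyword : String) (exclude_before : String) (exclude_after : String) (token_stem_text : List (List String)) : List (Int × List Int) :=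
  let key := PySem.Str.split₀ stemmed_keyword
  if key = [] then []
  else
    -- ", " is a nonempty separator, so split? is `some` and `.getD []` is exact
    let before := (PySem.Str.split? exclude_before ", ").getD []
    let after := (PySem.Str.split? exclude_after ", ").getD []
    ((PySem.List.enumerate token_stem_text).foldl (fun res p =>
        let inde : List Int :=
          if key.length = 1 then pvMatchOne (key.getD 0 "") before after p.2 else pvMatchMany key p.2
        if inde ≠ [] then res.insert p.1 inde else res) PySem.Dict.empty).items

-- ===== PRECONDITION & SPEC =====
-- Pre_ excludes exactly the keywords splitting into 0 or 5+ words, on which A raises NameError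
-- (`ind` is never assigned before use).
def Pre_keywords_indices (stemmed_keyword : String) (exclude_before : String) (exclude_after : String) (token_stem_text : List (List String)) : Prop :=
  1 ≤ (PySem.Str.split₀ stemmed_keyword).length ∧ (PySem.Str.split₀ stemmed_keyword).length ≤ 4
instance (stemmed_keyword : String) (exclude_before : String) (exclude_after : String) (token_stem_text : List (List String)) : Decidable (Pre_keywords_indices stemmed_keyword exclude_before exclude_after token_stem_text) := by unfold Pre_keywords_indices; infer_instance

def pvWitness_keywords_indices : String × String × String × List (List String) :=
  ("flood zone", "the", "a", [["flood", "zone", "map"], ["dry"]])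

def Spec_keywords_indices (stemmed_keyword : String) (exclude_before : String) (exclude_after : String) (token_stem_text : List (List String)) (out : List (Int × List Int)) : Prop := out = keywords_indices_alt stemmed_keyword exclude_before exclude_after token_stem_text
instance (stemmed_keyword : String) (exclude_before : String) (exclude_after : String) (token_stem_text : List (List String)) (out : List (Int × List Int)) : Decidable (Spec_keywords_indices stemmed_keyword exclude_before exclude_after token_stem_text out) := by unfold Spec_keywords_indices; infer_instance

-- ===== CLAIM (what is proved, stated in full; the proofs are below) =====
def Claim_equal_keywords_indices : Prop := ∀ (stemmed_keyword : String) (exclude_before : String) (exclude_after : String) (token_stem_text : List (List String)), Dom_keywords_indices stemmed_keyword exclude_before exclude_after token_stem_text → Pre_keywords_indices stemmed_keyword exclude_before exclude_after token_stem_text → Spec_keywords_indices stemmed_keyword exclude_before exclude_after token_stem_text (keywords_indices stemmed_keyword exclude_before exclude_after token_stem_text)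

-- ===== LEMMAS AND PROOFS =====

theorem pvEnumerateMap {α β : Type} (f : α → β) (xs : List α) (s : Int) :
    PySem.List.enumerate (xs.map f) s = (PySem.List.enumerate xs s).map (fun p => (p.1, f p.2)) := by
  induction xs generalizing s with
  | nil => rfl
  | cons x xs ih => simp [PySem.List.enumerate_cons, ih]

theorem pvItemsLoopGen {γ : Type} (f : γ → List Int) (l : List (Int × γ)) (d : PySem.Dict Int (List Int))
    (h1 : ∀ p ∈ l, d.contains p.1 = false) (h2 : (l.map (fun p => p.1)).Nodup) :
    (l.foldl (fun res p => if f p.2 ≠ [] then res.insert p.1 (f p.2) else res) d).items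
      = d.items ++ (l.filter (fun p => decide (f p.2 ≠ []))).map (fun p => (p.1, f p.2)) := by
  induction l generalizing d with
  | nil => simp
  | cons p l ih =>
    simp only [List.foldl_cons, List.filter_cons, List.map_cons, List.nodup_cons] at *
    by_cases hp : f p.2 ≠ []
    · rw [if_pos hp]
      rw [ih (d.insert p.1 (f p.2))
        (by
          intro q hq
          rw [PySem.Dict.contains_insert]
          have hne : ¬ q.1 = p.1 := by
            intro he; exact h2.1 (he ▸ (List.mem_map.mpr ⟨q, hq, rfl⟩))
          simp [hne, h1 q (List.mem_cons_of_mem p hq)])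
        h2.2]
      rw [PySem.Dict.items_insert_of_not_contains _ _ (h1 p List.mem_cons_self)]
      simp [hp]
    · rw [if_neg hp]
      rw [ih d (fun q hq => h1 q (List.mem_cons_of_mem p hq)) h2.2]
      simp at hp
      simp [hp]

theorem pvItemsLoop {γ : Type} (f : γ → List Int) (l : List (Int × γ))
    (hnd : (l.map (fun p => p.1)).Nodup) :
    (l.foldl (fun res p => if f p.2 ≠ [] then res.insert p.1 (f p.2) else res) PySem.Dict.empty).items
      = (l.filter (fun p => decide (f p.2 ≠ []))).map (fun p => (p.1, f p.2)) := by
  rw [pvItemsLoopGen f l PySem.Dict.empty (by intro p _; simp [PySem.Dict.contains_empty]) hnd]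
  simp [PySem.Dict.empty]

theorem pvItemsLoopId (l : List (Int × List Int)) (hnd : (l.map (fun p => p.1)).Nodup) :
    (l.foldl (fun res p => if p.2 ≠ [] then res.insert p.1 p.2 else res) PySem.Dict.empty).items
      = (l.filter (fun p => decide (p.2 ≠ []))).map (fun p => (p.1, p.2)) := by
  have h := pvItemsLoop (fun x => x) l hnd
  simpa using h

theorem pvRangeLoop (ind : List (List Int)) :
    (PySem.List.pyRange 0 (PySem.List.len ind)).foldl (fun res i =>
        if PySem.List.pyGetD ind i [] ≠ [] then res.insert i (PySem.List.pyGetD ind i []) else res)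
      PySem.Dict.empty
    = (PySem.List.enumerate ind).foldl (fun res p =>
        if p.2 ≠ [] then res.insert p.1 p.2 else res) PySem.Dict.empty := by
  rw [PySem.List.enumerate_eq_map_pyRange ind [], List.foldl_map]

theorem pvIndMap (tst : List (List String)) (idx : List String → List Int)
    (F : List String → List Int → Int → List Int) (hidx : idx [] = []) :
    (PySem.List.pyRange 0 (PySem.List.len (tst.map idx))).foldl (fun ind i =>
        ind ++ [if PySem.List.pyGetD (tst.map idx) i [] ≠ [] then
            (PySem.List.pyGetD (tst.map idx) i []).foldl (F (PySem.List.pyGetD tst i [])) [] else []]) []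
      = tst.map (fun t => if idx t ≠ [] then (idx t).foldl (F t) [] else []) := by
  have h1 : ∀ i, PySem.List.pyGetD (tst.map idx) i [] = idx (PySem.List.pyGetD tst i []) := by
    intro i; rw [← hidx, PySem.List.pyGetD_map]
  simp only [h1]
  rw [PySem.List.foldl_append_singleton_eq_map
      (f := fun i => if idx (PySem.List.pyGetD tst i []) ≠ [] then
        (idx (PySem.List.pyGetD tst i [])).foldl (F (PySem.List.pyGetD tst i [])) [] else [])]
  have h2 : PySem.List.len (tst.map idx) = ((tst.length : Int)) := by
    simp [PySem.List.len]
  rw [h2,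
    show (fun i => if idx (PySem.List.pyGetD tst i []) ≠ [] then
        (idx (PySem.List.pyGetD tst i [])).foldl (F (PySem.List.pyGetD tst i [])) [] else [])
      = (fun t => if idx t ≠ [] then (idx t).foldl (F t) [] else []) ∘ (fun i => PySem.List.pyGetD tst i []) from rfl,
    ← List.map_map, PySem.List.map_pyGetD_pyRange_zero']
  simp

theorem pvFilterMapSplit {α : Type} (test : α → Prop) [DecidablePred test] (c : Int → Prop)
    [DecidablePred c] (l : List (Int × α)) :
    l.filterMap (fun q => if test q.2 ∧ c q.1 then some q.1 else none)
      = (l.filterMap (fun q => if test q.2 then some q.1 else none)).filter (fun j => decide (c j)) := by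
  induction l with
  | nil => rfl
  | cons a l ih =>
    simp only [List.filterMap_cons]
    by_cases h1 : test a.2
    · by_cases h2 : c a.1
      · simp [h1, h2, ih]
      · simp [h1, h2, ih]
    · simp [h1, ih]

theorem pvMemOcc (k0 : String) (t : List String) (j : Int)
    (h : j ∈ (PySem.List.enumerate t).filterMap (fun p => if p.2 == k0 then some p.1 else none)) :
    ∃ (m : Nat) (hm : m < t.length), j = (m : Int) ∧ t[m] = k0 := by
  obtain ⟨p, hp, heq⟩ := List.mem_filterMap.mp h
  by_cases hc : p.2 == k0
  · obtain ⟨m, hm, hpe⟩ := (PySem.List.mem_enumerate_iff t 0 p).mp hp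
    refine ⟨m, hm, ?_, ?_⟩
    · rw [if_pos hc] at heq
      cases heq; rw [hpe]; simp
    · have := eq_of_beq hc
      rw [hpe] at this; simpa using this
  · rw [if_neg hc] at heq; cases heq

theorem pvTde (t : List String) (m : Nat) (a : String) (ks : List String) :
    (t.drop m).take (ks.length + 1) = a :: ks ↔ t[m]? = some a ∧ (t.drop (m + 1)).take ks.length = ks := by
  by_cases hm : m < t.length
  · rw [List.drop_eq_getElem_cons hm, List.take_succ_cons, List.getElem?_eq_getElem hm]
    simp
  · rw [List.drop_eq_nil_of_le (by omega), List.getElem?_eq_none (by omega)]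
    simp

theorem pvSliceEq (t : List String) (m : Nat) (key : List String) :
    (PySem.List.slice t (some (m : Int)) (some ((m : Int) + PySem.List.len key)) = key)
      ↔ (t.drop m).take key.length = key := by
  rw [show PySem.List.len key = ((key.length : Nat) : Int) from rfl, PySem.List.slice_natCast_add]

theorem pvSliceCons (t : List String) (m : Nat) (a : String) (ks : List String) :
    ((t.drop m).take (a :: ks).length = a :: ks)
      ↔ (m < t.length ∧ PySem.List.pyGetD t (m : Int) "" = a ∧ (t.drop (m + 1)).take ks.length = ks) := by
  rw [show (a :: ks).length = ks.length + 1 from rfl, pvTde]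
  by_cases hm : m < t.length
  · rw [List.getElem?_eq_getElem hm]
    simp [hm, PySem.List.pyGetD_natCast, eq_comm]
  · rw [List.getElem?_eq_none (by omega)]
    simp [hm]

theorem pvCase2 (k0 k1 : String) (t : List String) :
    (if ((PySem.List.enumerate t).filterMap (fun p => if p.2 == k0 then some p.1 else none)) ≠ [] then
        ((PySem.List.enumerate t).filterMap (fun p => if p.2 == k0 then some p.1 else none)).foldl
          (fun inde j =>
            if j + 1 < PySem.List.len t then
              (if PySem.List.pyGetD t (j + 1) "" == k1 then inde ++ [j] else inde)
            else inde) []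
      else [])
    = pvMatchMany [k0, k1] t := by
  unfold pvMatchMany
  rw [show ([k0, k1].getD 0 "") = k0 from rfl]
  rw [pvFilterMapSplit (test := fun x => (x == k0) = true)
      (c := fun j => PySem.List.slice t (some j) (some (j + PySem.List.len [k0, k1])) = [k0, k1])]
  by_cases h0 : (PySem.List.enumerate t).filterMap (fun p => if p.2 == k0 then some p.1 else none) = []
  · rw [if_neg (not_not_intro h0), h0]; simp
  · rw [if_pos h0]
    rw [PySem.List.foldl_congr_mem _ _
        (fun inde j => if PySem.List.slice t (some j) (some (j + PySem.List.len [k0, k1])) = [k0, k1]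
          then inde ++ [j] else inde) []
        (by
          intro acc j hj
          obtain ⟨m, hm, rfl, htm⟩ := pvMemOcc k0 t j hj
          have hiff : (PySem.List.slice t (some ((m : Int))) (some ((m : Int) + PySem.List.len [k0, k1])) = [k0, k1])
              ↔ ((m : Int) + 1 < PySem.List.len t ∧ (PySem.List.pyGetD t ((m : Int) + 1) "" == k1) = true) := by
            rw [pvSliceEq, pvSliceCons, pvSliceCons]
            have hcast : ((m : Int) + 1) = (((m + 1 : Nat)) : Int) := by push_cast; ring
            have hlen : PySem.List.len t = (t.length : Int) := rfl
            simp only [List.length_nil, List.take_zero, and_true, hcast, hlen,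
              PySem.List.pyGetD_natCast, beq_iff_eq]
            constructor
            · rintro ⟨_, _, h3, h4⟩; exact ⟨by exact_mod_cast h3, h4⟩
            · rintro ⟨h3, h4⟩
              exact ⟨hm, by rw [List.getD_eq_getElem t "" hm]; exact htm, by exact_mod_cast h3, h4⟩
          rw [← ite_and]
          exact if_congr hiff.symm rfl rfl)]
    rw [PySem.List.foldl_append_ite_eq_filter]
    simp

theorem pvCase3 (k0 k1 k2 : String) (t : List String) :
    (if ((PySem.List.enumerate t).filterMap (fun p => if p.2 == k0 then some p.1 else none)) ≠ [] then
        ((PySem.List.enumerate t).filterMap (fun p => if p.2 == k0 then some p.1 else none)).foldl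
          (fun inde j =>
            if j + 2 < PySem.List.len t then
              (if PySem.List.pyGetD t (j + 1) "" == k1 then
                (if PySem.List.pyGetD t (j + 2) "" == k2 then inde ++ [j] else inde)
               else inde)
            else inde) []
      else [])
    = pvMatchMany [k0, k1, k2] t := by
  unfold pvMatchMany
  rw [show ([k0, k1, k2].getD 0 "") = k0 from rfl]
  rw [pvFilterMapSplit (test := fun x => (x == k0) = true)
      (c := fun j => PySem.List.slice t (some j) (some (j + PySem.List.len [k0, k1, k2])) = [k0, k1, k2])]
  by_cases h0 : (PySem.List.enumerate t).filterMap (fun p => if p.2 == k0 then some p.1 else none) = []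
  · rw [if_neg (not_not_intro h0), h0]; simp
  · rw [if_pos h0]
    rw [PySem.List.foldl_congr_mem _ _
        (fun inde j => if PySem.List.slice t (some j) (some (j + PySem.List.len [k0, k1, k2])) = [k0, k1, k2]
          then inde ++ [j] else inde) []
        (by
          intro acc j hj
          obtain ⟨m, hm, rfl, htm⟩ := pvMemOcc k0 t j hj
          have hiff : (PySem.List.slice t (some ((m : Int))) (some ((m : Int) + PySem.List.len [k0, k1, k2])) = [k0, k1, k2])
              ↔ ((m : Int) + 2 < PySem.List.len t ∧ ((PySem.List.pyGetD t ((m : Int) + 1) "" == k1) = true ∧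
                  (PySem.List.pyGetD t ((m : Int) + 2) "" == k2) = true)) := by
            rw [pvSliceEq, pvSliceCons, pvSliceCons, pvSliceCons]
            have hcast1 : ((m : Int) + 1) = (((m + 1 : Nat)) : Int) := by push_cast; ring
            have hcast2 : ((m : Int) + 2) = (((m + 2 : Nat)) : Int) := by push_cast; ring
            have hlen : PySem.List.len t = (t.length : Int) := rfl
            simp only [List.length_nil, List.take_zero, and_true, hcast1, hcast2, hlen,
              PySem.List.pyGetD_natCast, beq_iff_eq]
            constructor
            · rintro ⟨_, _, _, h4, h5, h6⟩; exact ⟨by exact_mod_cast h5, h4, h6⟩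
            · rintro ⟨h3, h4, h5⟩
              have hb : m + 2 < t.length := by exact_mod_cast h3
              exact ⟨hm, by rw [List.getD_eq_getElem t "" hm]; exact htm,
                by omega, h4, by omega, h5⟩
          rw [← ite_and, ← ite_and]
          exact if_congr (by rw [and_assoc]; exact hiff.symm) rfl rfl)]
    rw [PySem.List.foldl_append_ite_eq_filter]
    simp

theorem pvCase4 (k0 k1 k2 k3 : String) (t : List String) :
    (if ((PySem.List.enumerate t).filterMap (fun p => if p.2 == k0 then some p.1 else none)) ≠ [] then
        ((PySem.List.enumerate t).filterMap (fun p => if p.2 == k0 then some p.1 else none)).foldl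
          (fun inde j =>
            if j + 3 < PySem.List.len t then
              (if PySem.List.pyGetD t (j + 1) "" == k1 then
                (if PySem.List.pyGetD t (j + 2) "" == k2 then
                  (if PySem.List.pyGetD t (j + 3) "" == k3 then inde ++ [j] else inde)
                 else inde)
               else inde)
            else inde) []
      else [])
    = pvMatchMany [k0, k1, k2, k3] t := by
  unfold pvMatchMany
  rw [show ([k0, k1, k2, k3].getD 0 "") = k0 from rfl]
  rw [pvFilterMapSplit (test := fun x => (x == k0) = true)
      (c := fun j => PySem.List.slice t (some j) (some (j + PySem.List.len [k0, k1, k2, k3])) = [k0, k1, k2, k3])]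
  by_cases h0 : (PySem.List.enumerate t).filterMap (fun p => if p.2 == k0 then some p.1 else none) = []
  · rw [if_neg (not_not_intro h0), h0]; simp
  · rw [if_pos h0]
    rw [PySem.List.foldl_congr_mem _ _
        (fun inde j => if PySem.List.slice t (some j) (some (j + PySem.List.len [k0, k1, k2, k3])) = [k0, k1, k2, k3]
          then inde ++ [j] else inde) []
        (by
          intro acc j hj
          obtain ⟨m, hm, rfl, htm⟩ := pvMemOcc k0 t j hj
          have hiff : (PySem.List.slice t (some ((m : Int))) (some ((m : Int) + PySem.List.len [k0, k1, k2, k3])) = [k0, k1, k2, k3])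
              ↔ ((m : Int) + 3 < PySem.List.len t ∧ ((PySem.List.pyGetD t ((m : Int) + 1) "" == k1) = true ∧
                  ((PySem.List.pyGetD t ((m : Int) + 2) "" == k2) = true ∧
                   (PySem.List.pyGetD t ((m : Int) + 3) "" == k3) = true))) := by
            rw [pvSliceEq, pvSliceCons, pvSliceCons, pvSliceCons, pvSliceCons]
            have hcast1 : ((m : Int) + 1) = (((m + 1 : Nat)) : Int) := by push_cast; ring
            have hcast2 : ((m : Int) + 2) = (((m + 2 : Nat)) : Int) := by push_cast; ring
            have hcast3 : ((m : Int) + 3) = (((m + 3 : Nat)) : Int) := by push_cast; ring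
            have hlen : PySem.List.len t = (t.length : Int) := rfl
            simp only [List.length_nil, List.take_zero, and_true, hcast1, hcast2, hcast3, hlen,
              PySem.List.pyGetD_natCast, beq_iff_eq]
            constructor
            · rintro ⟨_, _, _, h4, _, h5, h6, h7⟩; exact ⟨by exact_mod_cast h6, h4, h5, h7⟩
            · rintro ⟨h3, h4, h5, h6⟩
              have hb : m + 3 < t.length := by exact_mod_cast h3
              exact ⟨hm, by rw [List.getD_eq_getElem t "" hm]; exact htm,
                by omega, h4, by omega, h5, by omega, h6⟩
          rw [← ite_and, ← ite_and, ← ite_and]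
          exact if_congr (by rw [and_assoc, and_assoc]; exact hiff.symm) rfl rfl)]
    rw [PySem.List.foldl_append_ite_eq_filter]
    simp

theorem pvCase1 (k0 : String) (before after : List String) (t : List String) :
    (if ((PySem.List.enumerate t).filterMap (fun p => if p.2 == k0 then some p.1 else none)) ≠ [] then
        ((PySem.List.enumerate t).filterMap (fun p => if p.2 == k0 then some p.1 else none)).foldl
          (fun inde j =>
            if j = 0 ∧ j + 1 < PySem.List.len t then
              (if PySem.List.pyGetD t (j + 1) "" ∉ before then inde ++ [j] else inde)
            else if 1 ≤ j ∧ j + 1 = PySem.List.len t then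
              (if PySem.List.pyGetD t (j - 1) "" ∉ after then inde ++ [j] else inde)
            else if PySem.List.len t = 1 then inde ++ [j]
            else if 1 ≤ j ∧ j + 1 < PySem.List.len t then
              (if PySem.List.pyGetD t (j + 1) "" ∉ before ∧ PySem.List.pyGetD t (j - 1) "" ∉ after
               then inde ++ [j] else inde)
            else inde) []
      else [])
    = pvMatchOne k0 before after t := by
  unfold pvMatchOne
  rw [pvFilterMapSplit (test := fun x => (x == k0) = true)
      (c := fun j => (j + 1 = PySem.List.len t ∨ PySem.List.pyGetD t (j + 1) "" ∉ before) ∧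
        (j = 0 ∨ PySem.List.pyGetD t (j - 1) "" ∉ after))]
  by_cases h0 : (PySem.List.enumerate t).filterMap (fun p => if p.2 == k0 then some p.1 else none) = []
  · rw [if_neg (not_not_intro h0), h0]; simp
  · rw [if_pos h0]
    rw [PySem.List.foldl_congr_mem _ _
        (fun inde j => if ((j + 1 = PySem.List.len t ∨ PySem.List.pyGetD t (j + 1) "" ∉ before) ∧
            (j = 0 ∨ PySem.List.pyGetD t (j - 1) "" ∉ after)) then inde ++ [j] else inde) []
        (by
          intro acc j hj
          obtain ⟨m, hm, rfl, htm⟩ := pvMemOcc k0 t j hj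
          have hlen : PySem.List.len t = (t.length : Int) := rfl
          simp only [hlen]
          by_cases hb : PySem.List.pyGetD t ((m : Int) + 1) "" ∈ before <;>
            by_cases ha : PySem.List.pyGetD t ((m : Int) - 1) "" ∈ after <;>
            simp only [hb, ha, not_true, not_false_iff, and_true, true_and, and_false,
              or_true, or_false] <;>
            split_ifs <;> first | rfl | (exfalso; omega))]
    rw [PySem.List.foldl_append_ite_eq_filter]
    simp


theorem pvNodupFstEnum {γ : Type} (l : List γ) :
    ((PySem.List.enumerate l).map (fun p => p.1)).Nodup := by
  rw [PySem.List.map_fst_enumerate]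
  exact PySem.List.nodup_pyRange_one _ _

theorem pvMain (sk eb ea : String) (tst : List (List String))
    (hpre : Pre_keywords_indices sk eb ea tst) :
    keywords_indices sk eb ea tst = keywords_indices_alt sk eb ea tst := by
  unfold Pre_keywords_indices at hpre
  rcases e : PySem.Str.split₀ sk with _ | ⟨k0, _ | ⟨k1, _ | ⟨k2, _ | ⟨k3, _ | ⟨k4, rest⟩⟩⟩⟩⟩
  · rw [e] at hpre; simp at hpre
  · -- one-word keyword
    simp only [keywords_indices, keywords_indices_alt, e]
    simp only [List.length_cons, List.length_nil, Nat.reduceAdd, Nat.reduceEqDiff, reduceIte, List.getD_cons_zero]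
    have hI := pvIndMap tst
      (fun t => (PySem.List.enumerate t).filterMap (fun p => if p.2 == k0 then some p.1 else none))
      (fun t inde j =>
        if j = 0 ∧ j + 1 < PySem.List.len t then
          (if PySem.List.pyGetD t (j + 1) "" ∉ (PySem.Str.split? eb ", ").getD [] then inde ++ [j] else inde)
        else if 1 ≤ j ∧ j + 1 = PySem.List.len t then
          (if PySem.List.pyGetD t (j - 1) "" ∉ (PySem.Str.split? ea ", ").getD [] then inde ++ [j] else inde)
        else if PySem.List.len t = 1 then inde ++ [j]
        else if 1 ≤ j ∧ j + 1 < PySem.List.len t then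
          (if PySem.List.pyGetD t (j + 1) "" ∉ (PySem.Str.split? eb ", ").getD [] ∧
              PySem.List.pyGetD t (j - 1) "" ∉ (PySem.Str.split? ea ", ").getD []
           then inde ++ [j] else inde)
        else inde) rfl
    simp only [] at hI
    rw [hI, pvRangeLoop, pvItemsLoopId _ (pvNodupFstEnum _), pvEnumerateMap,
      List.filter_map, List.map_map]
    rw [pvItemsLoop _ _ (pvNodupFstEnum _)]
    simp only [pvCase1]
    rw [if_neg (List.cons_ne_nil k0 [])]
    simp only [Function.comp_def]
  · -- two-word keyword
    simp only [keywords_indices, keywords_indices_alt, e]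
    simp only [List.length_cons, List.length_nil, Nat.reduceAdd, Nat.reduceEqDiff, reduceIte, List.getD_cons_zero]
    rw [show ([k0, k1].getD 1 "") = k1 from rfl]
    have hI := pvIndMap tst
      (fun t => (PySem.List.enumerate t).filterMap (fun p => if p.2 == k0 then some p.1 else none))
      (fun t inde j =>
        if j + 1 < PySem.List.len t then
          (if PySem.List.pyGetD t (j + 1) "" == k1 then inde ++ [j] else inde)
        else inde) rfl
    simp only [] at hI
    rw [hI, pvRangeLoop, pvItemsLoopId _ (pvNodupFstEnum _), pvEnumerateMap,
      List.filter_map, List.map_map]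
    rw [pvItemsLoop _ _ (pvNodupFstEnum _)]
    simp only [pvCase2]
    rw [if_neg (List.cons_ne_nil k0 [k1])]
    simp only [Function.comp_def]
  · -- three-word keyword
    simp only [keywords_indices, keywords_indices_alt, e]
    simp only [List.length_cons, List.length_nil, Nat.reduceAdd, Nat.reduceEqDiff, reduceIte, List.getD_cons_zero]
    rw [show ([k0, k1, k2].getD 1 "") = k1 from rfl, show ([k0, k1, k2].getD 2 "") = k2 from rfl]
    have hI := pvIndMap tst
      (fun t => (PySem.List.enumerate t).filterMap (fun p => if p.2 == k0 then some p.1 else none))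
      (fun t inde j =>
        if j + 2 < PySem.List.len t then
          (if PySem.List.pyGetD t (j + 1) "" == k1 then
            (if PySem.List.pyGetD t (j + 2) "" == k2 then inde ++ [j] else inde)
           else inde)
        else inde) rfl
    simp only [] at hI
    rw [hI, pvRangeLoop, pvItemsLoopId _ (pvNodupFstEnum _), pvEnumerateMap,
      List.filter_map, List.map_map]
    rw [pvItemsLoop _ _ (pvNodupFstEnum _)]
    simp only [pvCase3]
    rw [if_neg (List.cons_ne_nil k0 [k1, k2])]
    simp only [Function.comp_def]
  · -- four-word keyword
    simp only [keywords_indices, keywords_indices_alt, e]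
    simp only [List.length_cons, List.length_nil, Nat.reduceAdd, Nat.reduceEqDiff, reduceIte, List.getD_cons_zero]
    rw [show ([k0, k1, k2, k3].getD 1 "") = k1 from rfl,
      show ([k0, k1, k2, k3].getD 2 "") = k2 from rfl,
      show ([k0, k1, k2, k3].getD 3 "") = k3 from rfl]
    have hI := pvIndMap tst
      (fun t => (PySem.List.enumerate t).filterMap (fun p => if p.2 == k0 then some p.1 else none))
      (fun t inde j =>
        if j + 3 < PySem.List.len t then
          (if PySem.List.pyGetD t (j + 1) "" == k1 then
            (if PySem.List.pyGetD t (j + 2) "" == k2 then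
              (if PySem.List.pyGetD t (j + 3) "" == k3 then inde ++ [j] else inde)
             else inde)
           else inde)
        else inde) rfl
    simp only [] at hI
    rw [hI, pvRangeLoop, pvItemsLoopId _ (pvNodupFstEnum _), pvEnumerateMap,
      List.filter_map, List.map_map]
    rw [pvItemsLoop _ _ (pvNodupFstEnum _)]
    simp only [pvCase4]
    rw [if_neg (List.cons_ne_nil k0 [k1, k2, k3])]
    simp only [Function.comp_def]
  · rw [e] at hpre; simp at hpre; omega

-- ===== VERDICT (by name: the statement is the Claim_ definition above) =====
theorem keywords_indices_spec : Claim_equal_keywords_indices := by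
  intro sk eb ea tst _ hpre
  unfold Spec_keywords_indices
  exact pvMain sk eb ea tst hpre
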